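-- pv_equiv track=rewrite | github.com/VetaKulakova/hydrogen_projects_bot | statistic_module.py | list_for_rate
-- ===== SOURCE A (Python) =====
-- def list_for_rate(list_of_smth):
--     duplicates = []
--     quantity = []
--     for item in list_of_smth:
--         if list_of_smth.count(item) > 1 and item not in duplicates:
--             duplicates.append(item)
--
--     for item in duplicates:
--         quantity.append(int(list_of_smth.count(item)))
--
--     rate = dict(zip(duplicates, quantity))
--     return rate
-- ===== SOURCE B (Python) =====
-- def list_for_rate(list_of_smth):
--     # One pass: build a count dict, then keep entries with count > 1.
--     counts = {}
--     for item in list_of_smth: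
--         counts[item] = counts.get(item, 0) + 1
--     return {item: n for item, n in counts.items() if n > 1}
-- ===== Notes on version B (the rewrite author's own statement) =====
-- stated objective: faster
-- what changed: B builds a count dictionary in a single pass and filters entries with count > 1, instead of A's repeated list.count scans inside two loops.
import Mathlib
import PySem

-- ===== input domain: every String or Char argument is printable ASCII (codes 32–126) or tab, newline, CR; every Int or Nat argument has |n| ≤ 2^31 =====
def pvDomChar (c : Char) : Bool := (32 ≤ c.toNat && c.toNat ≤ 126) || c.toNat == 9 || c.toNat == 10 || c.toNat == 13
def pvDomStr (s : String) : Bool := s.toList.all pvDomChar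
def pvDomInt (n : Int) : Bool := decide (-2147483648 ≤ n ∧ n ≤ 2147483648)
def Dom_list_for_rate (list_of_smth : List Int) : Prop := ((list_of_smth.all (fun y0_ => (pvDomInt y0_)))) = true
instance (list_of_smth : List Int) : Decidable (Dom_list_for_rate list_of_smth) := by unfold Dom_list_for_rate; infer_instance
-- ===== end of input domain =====

-- B replaces A's quadratic repeated list.count scans with a single counting pass
-- over a dict, then filters entries with count > 1 (objective: faster).

-- ===== PORT A =====
def list_for_rate (list_of_smth : List Int) : List (Int × Int) :=
  let duplicates := list_of_smth.foldl
    (fun dup item =>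
      if list_of_smth.count item > 1 ∧ item ∉ dup then dup ++ [item] else dup) []
  let quantity := duplicates.foldl
    (fun q item => q ++ [(list_of_smth.count item : Int)]) []
  (PySem.Dict.ofList (duplicates.zip quantity)).items

-- ===== PORT B =====
-- the dict comprehension iterates counts.items() (distinct keys), so its items
-- are exactly the filtered items list
def list_for_rate_alt (list_of_smth : List Int) : List (Int × Int) :=
  let counts := list_of_smth.foldl
    (fun d x => d.insert x (d.getD x 0 + 1)) (PySem.Dict.empty : PySem.Dict Int Int)
  counts.items.filter (fun p => decide (p.2 > 1))

-- ===== PRECONDITION & SPEC =====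
def Spec_list_for_rate (list_of_smth : List Int) (out : List (Int × Int)) : Prop := out = list_for_rate_alt list_of_smth
instance (list_of_smth : List Int) (out : List (Int × Int)) : Decidable (Spec_list_for_rate list_of_smth out) := by unfold Spec_list_for_rate; infer_instance

-- ===== CLAIM (what is proved, stated in full; the proofs are below) =====
def Claim_equal_list_for_rate : Prop := ∀ (list_of_smth : List Int), Dom_list_for_rate list_of_smth → Spec_list_for_rate list_of_smth (list_for_rate list_of_smth)

-- ===== LEMMAS AND PROOFS =====

-- A's accumulation step is exactly "add to the set when the count predicate holds"
theorem set_add_eq (s : List Int) (x : Int) :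
    PySem.Set.add s x = if x ∈ s then s else s ++ [x] := by
  simp only [PySem.Set.add, PySem.Set.contains]
  by_cases h : x ∈ s <;> simp [h]

theorem stepA_eq_add (xs : List Int) (dup : List Int) (item : Int) :
    (if xs.count item > 1 ∧ item ∉ dup then dup ++ [item] else dup)
      = (if xs.count item > 1 then PySem.Set.add dup item else dup) := by
  rw [set_add_eq]
  by_cases h1 : xs.count item > 1
  · by_cases h2 : item ∈ dup <;> simp [h1, h2]
  · simp [h1]

-- guarded Set.add fold = Set.add fold over the filtered list
theorem foldl_guard_add (p : Int → Prop) [DecidablePred p] (l : List Int) (s : List Int) :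
    l.foldl (fun s x => if p x then PySem.Set.add s x else s) s
      = (l.filter (fun x => decide (p x))).foldl PySem.Set.add s := by
  induction l generalizing s with
  | nil => rfl
  | cons x l ih =>
    by_cases h : p x <;> simp [List.filter, h, ih]

-- List.filter commutes with a Set.add fold
theorem filter_foldl_add (p : Int → Bool) (l : List Int) (s : List Int) :
    (l.foldl PySem.Set.add s).filter p = (l.filter p).foldl PySem.Set.add (s.filter p) := by
  induction l generalizing s with
  | nil => rfl
  | cons x l ih =>
    have hstep : (PySem.Set.add s x).filter p
        = if p x = true then PySem.Set.add (s.filter p) x else s.filter p := by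
      rw [set_add_eq]
      by_cases hm : x ∈ s
      · by_cases hp : p x = true
        · have : x ∈ s.filter p := List.mem_filter.mpr ⟨hm, hp⟩
          simp [hm, hp, this]
        · simp [hm, hp]
      · have hmf : x ∉ s.filter p := fun hx => hm (List.mem_of_mem_filter hx)
        by_cases hp : p x = true <;>
          simp [hm, hp, hmf, List.filter_append, List.filter]
    rw [List.foldl_cons, ih (PySem.Set.add s x), hstep]
    by_cases hp : p x = true <;> simp [hp]

-- zipping a list with a map over itself pairs each element with its image
theorem zip_map_self (f : Int → Int) (l : List Int) :
    l.zip (l.map f) = l.map (fun x => (x, f x)) := by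
  induction l with
  | nil => rfl
  | cons x l ih => simp [ih]

-- A's duplicates list is the filtered ordered dedup of the input
theorem duplicates_eq (xs : List Int) :
    xs.foldl (fun dup item =>
        if xs.count item > 1 ∧ item ∉ dup then dup ++ [item] else dup) []
      = (PySem.Set.ofList xs).filter (fun x => decide (xs.count x > 1)) := by
  have h1 : xs.foldl (fun dup item =>
        if xs.count item > 1 ∧ item ∉ dup then dup ++ [item] else dup) []
      = xs.foldl (fun s x => if xs.count x > 1 then PySem.Set.add s x else s) [] := by
    congr 1; funext dup item; exact stepA_eq_add xs dup item
  rw [h1, foldl_guard_add (fun x => xs.count x > 1) xs []]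
  rw [PySem.Set.ofList_eq_foldl, filter_foldl_add]
  rfl

-- ===== VERDICT (by name: the statement is the Claim_ definition above) =====
theorem list_for_rate_spec : Claim_equal_list_for_rate := by
  intro xs _
  unfold Spec_list_for_rate list_for_rate list_for_rate_alt
  dsimp only
  rw [PySem.Dict.foldl_insert_getD_add_one_eq_counter, PySem.Dict.items_counter]
  rw [duplicates_eq, PySem.List.foldl_append_singleton_eq_map, List.nil_append]
  rw [List.filter_map]
  set dups := (PySem.Set.ofList xs).filter (fun x => decide (xs.count x > 1)) with hd
  rw [zip_map_self (fun item => (xs.count item : Int)) dups]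
  have hnodup : dups.Nodup :=
    ((PySem.Set.nodup_ofList xs).filter _)
  have hfresh : ∀ a ∈ dups.map (fun k => (k, (xs.count k : Int))),
      (PySem.Dict.empty : PySem.Dict Int Int).contains a.1 = false := by
    intro a _; exact PySem.Dict.contains_empty _
  have hkeys : ((dups.map (fun k => (k, (xs.count k : Int)))).map Prod.fst).Nodup := by
    rw [List.map_map]
    have : (Prod.fst ∘ fun k : Int => (k, (xs.count k : Int))) = id := by
      funext k; rfl
    rw [this, List.map_id]
    exact hnodup
  have hitems := PySem.Dict.items_foldl_insert_fresh
    (dups.map (fun k => (k, (xs.count k : Int)))) Prod.fst Prod.snd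
    (PySem.Dict.empty : PySem.Dict Int Int) hfresh hkeys
  have hofList : (PySem.Dict.ofList (dups.map (fun k => (k, (xs.count k : Int))))).items
      = dups.map (fun k => (k, (xs.count k : Int))) := by
    unfold PySem.Dict.ofList PySem.Dict.update
    simpa using hitems
  rw [hofList]
  have hpred : ((fun p => decide ((1:Int) < p.2)) ∘ (fun k => (k, (xs.count k : Int))))
      = (fun x => decide (xs.count x > 1)) := by
    funext x; simp
  rw [hpred]
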